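-- pv_equiv track=rewrite | github.com/duckyluuk/AoC-2023 | 7/7.py | get_set_value
-- ===== SOURCE A (Python) =====
-- def get_set_value(hand, jokers=False):
--     nums = []
--     cards = [*hand]
--     joker_count = 0
--     while cards:
--         card = cards.pop()
--         if card == "J" and jokers:
--             joker_count += 1
--             continue
--         nums.append(cards.count(card) + 1)
--         cards = list(filter(lambda x: x != card, cards))
--     nums = list(sorted(nums, reverse=True)) + [0]
--     if joker_count:
--         nums[0] += joker_count
--     return nums
-- ===== SOURCE B (Python) =====
-- def get_set_value(hand, jokers=False):
--     joker_count = hand.count("J") if jokers else 0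
--     counts = {}
--     for c in hand:
--         if not (jokers and c == "J"):
--             counts[c] = counts.get(c, 0) + 1
--     nums = sorted(counts.values(), reverse=True) + [0]
--     if joker_count:
--         nums[0] += joker_count
--     return nums
-- ===== Notes on version B (the rewrite author's own statement) =====
-- stated objective: faster
-- what changed: Replaces A's quadratic pop/count/filter rebuild loop with a single-pass frequency dictionary whose values are read off and sorted once.
import Mathlib
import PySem

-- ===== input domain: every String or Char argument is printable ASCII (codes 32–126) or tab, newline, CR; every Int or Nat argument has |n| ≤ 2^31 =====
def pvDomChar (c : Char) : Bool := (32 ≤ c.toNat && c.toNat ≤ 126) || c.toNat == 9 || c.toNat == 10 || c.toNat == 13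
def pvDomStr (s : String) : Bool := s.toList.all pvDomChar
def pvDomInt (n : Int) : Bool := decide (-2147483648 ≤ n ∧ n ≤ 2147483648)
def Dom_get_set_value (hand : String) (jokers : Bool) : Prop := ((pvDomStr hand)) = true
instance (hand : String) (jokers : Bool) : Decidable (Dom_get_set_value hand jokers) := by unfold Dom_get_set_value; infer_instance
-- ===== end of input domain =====

-- B replaces A's quadratic pop/count/filter rebuild loop with a single-pass
-- frequency dictionary whose values are sorted once (measured faster).


-- ===== PORT A =====
-- the while-cards loop: pop from the end, count the joker or record the card's
-- count-in-the-remainder + 1 and filter out all its copies; returns (nums, joker_count)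
def pvALoop (jokers : Bool) : List Char → List Int → Int → List Int × Int
  | [], nums, jc => (nums, jc)
  | c :: cs, nums, jc =>
    let card := (c :: cs).getLast (by simp)
    let rest := (c :: cs).dropLast
    if card == 'J' && jokers then
      pvALoop jokers rest nums (jc + 1)
    else
      pvALoop jokers (rest.filter (fun x => x != card))
        (nums ++ [(rest.count card : Int) + 1]) jc
  termination_by cards _ _ => cards.length
  decreasing_by
    · simp
    · have := List.length_filter_le (fun x => x != (c :: cs).getLast (by simp)) (c :: cs).dropLast
      simp at this ⊢
      omega

def get_set_value (hand : String) (jokers : Bool) : List Int :=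
  let res := pvALoop jokers hand.toList [] 0
  let nums := PySem.List.sorted res.1 (fun x => x) true ++ [0]
  if res.2 ≠ 0 then
    match nums with
    | [] => []               -- unreachable: nums ends in [0]
    | x :: t => (x + res.2) :: t
  else nums

-- ===== PORT B =====
def get_set_value_alt (hand : String) (jokers : Bool) : List Int :=
  let joker_count : Int := if jokers then (hand.toList.count 'J' : Int) else 0
  let counts := hand.toList.foldl
    (fun d c => if !(jokers && c == 'J') then d.insert c (d.getD c 0 + 1) else d)
    (PySem.Dict.empty : PySem.Dict Char Int)
  let nums := PySem.List.sorted counts.values (fun x => x) true ++ [0]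
  if joker_count ≠ 0 then
    match nums with
    | [] => []               -- unreachable: nums ends in [0]
    | x :: t => (x + joker_count) :: t
  else nums

-- ===== PRECONDITION & SPEC =====
def Spec_get_set_value (hand : String) (jokers : Bool) (out : List Int) : Prop := out = get_set_value_alt hand jokers
instance (hand : String) (jokers : Bool) (out : List Int) : Decidable (Spec_get_set_value hand jokers out) := by unfold Spec_get_set_value; infer_instance

-- ===== CLAIM (what is proved, stated in full; the proofs are below) =====
def Claim_equal_get_set_value : Prop := ∀ (hand : String) (jokers : Bool), Dom_get_set_value hand jokers → Spec_get_set_value hand jokers (get_set_value hand jokers)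

-- ===== LEMMAS AND PROOFS =====

-- the per-distinct-card counts of xs, in first-occurrence order (proof-only helper)
def pvCounts (xs : List Char) : List Int :=
  (PySem.Set.ofList xs).map (fun c => (xs.count c : Int))

-- removing the last card a: its total count splits off, the rest keeps its counts
lemma pvCounts_snoc (ys : List Char) (a : Char) :
    (pvCounts (ys ++ [a])).Perm
      (((ys.count a : Int) + 1) :: pvCounts (ys.filter (fun x => x != a))) := by
  unfold pvCounts
  have hset : (PySem.Set.ofList (ys ++ [a])).Perm (a :: PySem.Set.ofList (ys.filter (fun x => x != a))) := by
    refine (List.perm_ext_iff_of_nodup (PySem.Set.nodup_ofList _) ?_).2 ?_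
    · refine List.Nodup.cons ?_ (PySem.Set.nodup_ofList _)
      simp [PySem.Set.mem_ofList]
    · intro x
      simp [PySem.Set.mem_ofList, List.mem_filter]
      by_cases hx : x = a <;> simp [hx]
  have h1 := hset.map (fun c => ((ys ++ [a]).count c : Int))
  refine h1.trans ?_
  simp only [List.map_cons]
  have hca : ((ys ++ [a]).count a : Int) = (ys.count a : Int) + 1 := by
    simp [List.count_append]
  rw [hca]
  refine List.Perm.cons _ ?_
  refine (List.map_congr_left ?_) ▸ List.Perm.refl _
  intro c hc
  have hcne : c ≠ a := by
    have := (PySem.Set.mem_ofList _ _).1 hc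
    simp [List.mem_filter] at this
    exact this.2
  simp [List.count_append, List.count_filter, hcne, Ne.symm hcne]

-- a reverse-sorted Int list is determined by the multiset
lemma pv_sorted_rev_eq_of_perm (xs ys : List Int) (h : xs.Perm ys) :
    PySem.List.sorted xs (fun x => x) true = PySem.List.sorted ys (fun x => x) true := by
  refine List.Perm.eq_of_pairwise (le := fun a b : Int => b ≤ a)
    (fun a b _ _ h1 h2 => le_antisymm h2 h1)
    (PySem.List.sorted_pairwise_rev xs (fun x => x))
    (PySem.List.sorted_pairwise_rev ys (fun x => x))
    (((PySem.List.sorted_perm xs _ true).trans h).trans (PySem.List.sorted_perm ys _ true).symm)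

lemma pvALoop_cons (jokers : Bool) (c : Char) (cs : List Char) (nums : List Int) (jc : Int) :
    pvALoop jokers (c :: cs) nums jc =
      (if (c :: cs).getLast (by simp) == 'J' && jokers then
        pvALoop jokers (c :: cs).dropLast nums (jc + 1)
      else
        pvALoop jokers ((c :: cs).dropLast.filter (fun x => x != (c :: cs).getLast (by simp)))
          (nums ++ [((c :: cs).dropLast.count ((c :: cs).getLast (by simp)) : Int) + 1]) jc) := by
  rw [pvALoop]

lemma pvALoop_spec (jokers : Bool) :
    ∀ (n : Nat) (cards : List Char), cards.length ≤ n → ∀ (nums : List Int) (jc : Int),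
      (pvALoop jokers cards nums jc).1.Perm
        (nums ++ pvCounts (cards.filter (fun c => !(jokers && c == 'J')))) ∧
      (pvALoop jokers cards nums jc).2
        = jc + (if jokers then (cards.count 'J' : Int) else 0) := by
  intro n
  induction n with
  | zero =>
    intro cards hlen nums jc
    have : cards = [] := by simpa using List.length_eq_zero_iff.1 (Nat.le_zero.1 hlen)
    subst this
    simp [pvALoop, pvCounts]
  | succ m ih =>
    intro cards hlen nums jc
    match cards with
    | [] => simp [pvALoop, pvCounts]
    | c :: cs =>
      rw [pvALoop_cons]
      set a := (c :: cs).getLast (by simp) with ha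
      set rest := (c :: cs).dropLast with hrest
      have hsplit : c :: cs = rest ++ [a] := by
        rw [ha, hrest]; exact (List.dropLast_append_getLast (by simp)).symm
      have hrl : rest.length ≤ m := by
        have := congrArg List.length hsplit
        simp at this hlen; omega
      by_cases hce : (a == 'J' && jokers) = true
      · rw [if_pos hce]
        have haj : a = 'J' := by simp at hce; exact hce.1
        have hjk : jokers = true := by simp at hce; exact hce.2
        obtain ⟨h1, h2⟩ := ih rest hrl nums (jc + 1)
        constructor
        · refine h1.trans ?_
          have : (c :: cs).filter (fun c => !(jokers && c == 'J'))
               = rest.filter (fun c => !(jokers && c == 'J')) := by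
            rw [hsplit, List.filter_append]
            simp [haj, hjk]
          rw [this]
        · rw [h2, hsplit]
          simp [haj, hjk, List.count_append]
          ring
      · rw [if_neg hce]
        have hpa : (!(jokers && a == 'J')) = true := by
          simp at hce ⊢; tauto
        obtain ⟨h1, h2⟩ := ih (rest.filter (fun x => x != a))
          (le_trans (List.length_filter_le _ _) hrl)
          (nums ++ [(rest.count a : Int) + 1]) jc
        have hcomm : ((rest.filter (fun x => x != a)).filter (fun c => !(jokers && c == 'J')))
            = ((rest.filter (fun c => !(jokers && c == 'J'))).filter (fun x => x != a)) := by
          rw [List.filter_filter, List.filter_filter]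
          apply List.filter_congr
          intro x _
          simp [Bool.and_comm]
        constructor
        · rw [hcomm] at h1
          refine h1.trans ?_
          have hfl : (c :: cs).filter (fun c => !(jokers && c == 'J'))
               = rest.filter (fun c => !(jokers && c == 'J')) ++ [a] := by
            rw [hsplit, List.filter_append]
            have hpa' := hpa
            simp at hpa' ⊢
            tauto
          rw [hfl]
          have hcnt : ((rest.filter (fun c => !(jokers && c == 'J'))).count a) = rest.count a :=
            List.count_filter hpa
          have hsnoc := pvCounts_snoc (rest.filter (fun c => !(jokers && c == 'J'))) a
          rw [hcnt] at hsnoc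
          rw [List.append_assoc]
          exact List.Perm.append_left nums hsnoc.symm
        · rw [h2, hsplit]
          rcases Bool.eq_false_or_eq_true jokers with hj | hj
          · have haj : a ≠ 'J' := by
              intro h; exact hce (by simp [h, hj])
            have hcj : (rest.filter (fun x => x != a)).count 'J' = rest.count 'J' :=
              List.count_filter (by simpa using Ne.symm haj)
            simp [hj, List.count_append, hcj, haj]
          · simp [hj]

-- ===== VERDICT (by name: the statement is the Claim_ definition above) =====
theorem get_set_value_spec : Claim_equal_get_set_value := by
  unfold Claim_equal_get_set_value Spec_get_set_value
  intro hand jokers _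
  simp only [get_set_value, get_set_value_alt]
  obtain ⟨h1, h2⟩ := pvALoop_spec jokers hand.toList.length hand.toList le_rfl [] 0
  have hb : hand.toList.foldl
      (fun d c => if !(jokers && c == 'J') then d.insert c (d.getD c 0 + 1) else d)
      (PySem.Dict.empty : PySem.Dict Char Int)
      = PySem.Dict.counter (hand.toList.filter (fun c => !(jokers && c == 'J'))) := by
    rw [PySem.List.foldl_if_eq_foldl_filter]
    exact PySem.Dict.foldl_insert_getD_add_one_eq_counter _
  have hv : (PySem.Dict.counter (hand.toList.filter (fun c => !(jokers && c == 'J')))).values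
      = pvCounts (hand.toList.filter (fun c => !(jokers && c == 'J'))) := by
    rw [PySem.Dict.values_eq_map_keys _ (PySem.Dict.nodup_keys_counter _) 0,
      PySem.Dict.keys_counter]
    unfold pvCounts
    exact List.map_congr_left (fun c _ => PySem.Dict.getD_counter _ _)
  rw [hb, hv]
  have hs := pv_sorted_rev_eq_of_perm _ _ (by simpa using h1)
  rw [hs, h2]
  simp
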